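-- pv_equiv track=rewrite | github.com/rhoitjadhav/competitive-programming-practice | codeforces/archive/1497A.Meximization.py | solve
-- ===== SOURCE A (Python) =====
-- def solve(n, arr):
--     if n == 1:
--         return arr
--
--     arr.sort()
--     duplicate = []
--     s = set([arr[0]])
--     output = [arr[0]]
--
--     for i in range(1, n):
--         if arr[i] in s:
--             duplicate.append(arr[i])
--         else:
--             output.append(arr[i])
--             s.add(arr[i])
--
--     output.extend(duplicate)
--     return output
-- ===== SOURCE B (Python) =====
-- def solve(n, arr):
--     if n == 1:
--         return arr
--
--     arr.sort()
--     counts = {arr[0]: 1}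
--     for x in arr[1:n]:
--         counts[x] = counts.get(x, 0) + 1
--     out = list(counts)
--     for k, c in counts.items():
--         out.extend([k] * (c - 1))
--     return out
-- ===== Notes on version B (the rewrite author's own statement) =====
-- stated objective: alternative
-- what changed: Replaces A's one-pass seen-set scan that splits the sorted list into uniques and duplicates with a counting approach: build a dict of multiplicities (seeded with the minimum, counting over A's loop domain arr[1:n]), output its keys (the distinct values in order) and then each key repeated count-1 times.
-- intended difference: For negative n with len(arr)+n >= 2 (an n that is no valid element count), A returns just [min(arr)] because its pre-seeded output survives the empty range(1,n), while B follows Python's slice reading of its loop domain arr[1:n] (wrapping around) and returns the distinct-then-duplicates answer for all but the last |n| elements; nothing is specified there and B's slice reading is at least as defensible. — e.g. on solve(-1, [1, 1, 2]): A returns [1], B returns [1, 1]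
import Mathlib
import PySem

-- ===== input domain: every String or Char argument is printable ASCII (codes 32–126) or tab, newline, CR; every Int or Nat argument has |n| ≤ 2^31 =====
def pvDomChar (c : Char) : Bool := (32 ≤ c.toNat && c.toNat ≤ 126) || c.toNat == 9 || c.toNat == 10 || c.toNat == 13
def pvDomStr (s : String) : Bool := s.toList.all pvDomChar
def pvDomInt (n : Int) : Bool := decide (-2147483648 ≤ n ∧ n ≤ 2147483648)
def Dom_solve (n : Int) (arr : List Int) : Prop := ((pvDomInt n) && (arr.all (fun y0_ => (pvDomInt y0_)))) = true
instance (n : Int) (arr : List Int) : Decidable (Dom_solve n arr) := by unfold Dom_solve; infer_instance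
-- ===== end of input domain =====

-- B replaces A's seen-set scan by a counting dict over the sorted prefix (keys, then each
-- key count-1 more times). Both A and B sort arr in place in Python; the equivalence
-- proved here is about the return value.

-- ===== PORT A =====
-- Python A: sort; seed output/set with arr[0]; for i in range(1, n) test arr[i] against the
-- seen set, appending to output or duplicate; return output ++ duplicate.
-- The fold state is Option-wrapped: 'none' models an IndexError raised by arr[i].
def solve (n : Int) (arr : List Int) : List Int :=
  if n = 1 then arr
  else
    let s := PySem.List.sorted arr (fun x => x) false
    match PySem.List.pyGet? s 0 with
    | none => []  -- Python raises IndexError here (empty arr; outside Pre_)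
    | some a0 =>
      match (PySem.List.pyRange 1 n 1).foldl
        (fun (acc : Option (List Int × PySem.Set Int × List Int)) (i : Int) =>
          match acc with
          | none => none
          | some (dup, seen, out) =>
            match PySem.List.pyGet? s i with
            | none => none  -- IndexError
            | some x =>
              if PySem.Set.contains seen x then some (dup ++ [x], seen, out)
              else some (dup, PySem.Set.add seen x, out ++ [x]))
        (some (([] : List Int), PySem.Set.ofList [a0], [a0])) with
      | none => []  -- Python raises IndexError inside the loop (outside Pre_)
      | some (dup, _, out) => out ++ dup

-- ===== PORT B =====
-- Python B: sort; counts = {arr[0]: 1}; count multiplicities of arr[1:n] into it;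
-- out = list(counts) (the keys in insertion order); then for (k, c) in items extend out
-- by [k] * (c - 1).
def solve_alt (n : Int) (arr : List Int) : List Int :=
  if n = 1 then arr
  else
    let s := PySem.List.sorted arr (fun x => x) false
    match PySem.List.pyGet? s 0 with
    | none => []  -- Python raises IndexError here (empty arr; outside Pre_)
    | some a0 =>
      let counts := (PySem.List.slice s (some 1) (some n)).foldl
        (fun (d : PySem.Dict Int Int) (x : Int) => d.insert x (d.getD x 0 + 1))
        (PySem.Dict.empty.insert a0 1)
      counts.items.foldl (fun (o : List Int) (kc : Int × Int) => o ++ List.replicate (kc.2 - 1).toNat kc.1) counts.keys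

-- ===== PRECONDITION & SPEC =====
-- Pre_ is exactly the set of inputs on which Python A returns normally (elsewhere it
-- raises IndexError).
def Pre_solve (n : Int) (arr : List Int) : Prop :=
  n = 1 ∨ (arr ≠ [] ∧ n ≤ (arr.length : Int))
instance (n : Int) (arr : List Int) : Decidable (Pre_solve n arr) := by unfold Pre_solve; infer_instance
def pvWitness_solve : Int × List Int := (2, [3, 1])

-- For negative n with len(arr) + n ≥ 2 (an n that is no valid element count), A returns
-- just [min(arr)] because its pre-seeded output survives the empty range(1, n), while B
-- follows Python's slice reading of its loop domain arr[1:n] (wrapping around) and returns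
-- the distinct-then-duplicates answer for all but the last |n| elements; nothing is
-- specified there and B's slice reading is at least as defensible.
def D_solve (n : Int) (arr : List Int) : Prop :=
  n < 0 ∧ 2 ≤ (arr.length : Int) + n
instance (n : Int) (arr : List Int) : Decidable (D_solve n arr) := by unfold D_solve; infer_instance
def Spec_solve (n : Int) (arr : List Int) (out : List Int) : Prop := ¬ D_solve n arr → out = solve_alt n arr
instance (n : Int) (arr : List Int) (out : List Int) : Decidable (Spec_solve n arr out) := by unfold Spec_solve; infer_instance
def pvDiffWitness_solve : Int × List Int := (-1, [1, 1, 2])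
def pvDiffWitnessOut_solve : (List Int) × (List Int) := ([1], [1, 1])

-- ===== CLAIM (what is proved, stated in full; the proofs are below) =====
def Claim_unchanged_solve : Prop := ∀ (n : Int) (arr : List Int), Dom_solve n arr → Pre_solve n arr → Spec_solve n arr (solve n arr)
def Claim_changed_solve : Prop := Dom_solve (pvDiffWitness_solve.1) (pvDiffWitness_solve.2) ∧ Pre_solve (pvDiffWitness_solve.1) (pvDiffWitness_solve.2) ∧ D_solve (pvDiffWitness_solve.1) (pvDiffWitness_solve.2) ∧ solve (pvDiffWitness_solve.1) (pvDiffWitness_solve.2) = pvDiffWitnessOut_solve.1 ∧ solve_alt (pvDiffWitness_solve.1) (pvDiffWitness_solve.2) = pvDiffWitnessOut_solve.2 ∧ pvDiffWitnessOut_solve.1 ≠ pvDiffWitnessOut_solve.2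
def Claim_exact_solve : Prop := ∀ (n : Int) (arr : List Int), Dom_solve n arr → Pre_solve n arr → D_solve n arr → solve n arr ≠ solve_alt n arr

-- ===== LEMMAS AND PROOFS =====

-- the pure step of A's scan (what one iteration of A's loop does to (duplicate, s, output))
def pvStep (acc : List Int × PySem.Set Int × List Int) (x : Int) : List Int × PySem.Set Int × List Int :=
  if PySem.Set.contains acc.2.1 x then (acc.1 ++ [x], acc.2.1, acc.2.2)
  else (acc.1, PySem.Set.add acc.2.1 x, acc.2.2 ++ [x])

-- B's duplicate block: each distinct value of p, count-1 more times, in first-occurrence order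
def pvFM (p : List Int) : List Int :=
  (PySem.Set.ofList p).flatMap (fun k => List.replicate (((p.count k : Int)) - 1).toNat k)

-- A's index loop over pyRange with pyGet? is a pure pvStep-fold over the visited sublist
theorem pv_loopA (s : List Int) (m : Nat) : ∀ (a : Int) (st : List Int × PySem.Set Int × List Int), 0 ≤ a → a.toNat + m ≤ s.length →
    (PySem.List.pyRange a (a + m) 1).foldl
      (fun (acc : Option (List Int × PySem.Set Int × List Int)) (i : Int) =>
        match acc with
        | none => none
        | some (dup, seen, out) =>
          match PySem.List.pyGet? s i with
          | none => none
          | some x =>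
            if PySem.Set.contains seen x then some (dup ++ [x], seen, out)
            else some (dup, PySem.Set.add seen x, out ++ [x]))
      (some st)
    = some (((s.drop a.toNat).take m).foldl pvStep st) := by
  induction m with
  | zero =>
    intro a st ha hle
    rw [show a + (0:Nat) = a by simp, PySem.List.pyRange_one_eq_nil (le_refl a)]
    simp
  | succ m ih =>
    intro a st ha hle
    have hlt : a < s.length := by omega
    have hcons := PySem.List.pyRange_one_cons (a := a) (b := a + (m+1:Nat)) (by push_cast; omega)
    rw [hcons]
    have hget : PySem.List.pyGet? s a = some (s[a.toNat]'(by omega)) := by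
      exact PySem.List.pyGet?_eq_some_getElem s ha (by omega)
    have hdrop : s.drop a.toNat = s[a.toNat]'(by omega) :: s.drop (a.toNat + 1) := by
      exact List.drop_eq_getElem_cons (by omega)
    have harg : a + (m+1:Nat) = (a+1) + (m:Nat) := by push_cast; ring
    rw [List.foldl_cons, hdrop, List.take_succ_cons, List.foldl_cons, harg]
    have h1 : (a+1).toNat = a.toNat + 1 := by omega
    cases st with
    | mk dup rest =>
      cases rest with
      | mk seen out =>
        simp only [hget, pvStep]
        by_cases hc : PySem.Set.contains seen (s[a.toNat]'(by omega))
        · rw [if_pos hc]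
          have hih := ih (a+1) (dup ++ [s[a.toNat]'(by omega)], seen, out) (by omega) (by omega)
          rw [h1] at hih
          rw [hih]
          simp only [hc, if_pos]
        · rw [if_neg hc]
          have hih := ih (a+1) (dup, PySem.Set.add seen (s[a.toNat]'(by omega)), out ++ [s[a.toNat]'(by omega)]) (by omega) (by omega)
          rw [h1] at hih
          rw [hih]
          simp only [hc, if_neg, Bool.false_eq_true, not_false_iff]

-- head of a dropWhile fails the predicate
theorem pv_head_dropWhile (pred : Int → Bool) : ∀ (l : List Int) (y : Int) (ys : List Int),
    l.dropWhile pred = y :: ys → pred y = false := by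
  intro l
  induction l with
  | nil => intro y ys h; simp [List.dropWhile] at h
  | cons a l ih =>
    intro y ys h
    rw [List.dropWhile_cons] at h
    by_cases hp : pred a = true
    · rw [if_pos hp] at h; exact ih y ys h
    · rw [if_neg hp] at h
      cases h
      simpa using hp

-- scanning a block of copies of an already-seen value only appends duplicates
theorem pv_scan_rep_mem (x : Int) (seen : PySem.Set Int) (hx : x ∈ seen) :
    ∀ (m : Nat) (dup out : List Int),
    (List.replicate m x).foldl pvStep (dup, seen, out) = (dup ++ List.replicate m x, seen, out) := by
  intro m
  induction m with
  | zero => intro dup out; simp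
  | succ m ih =>
    intro dup out
    rw [List.replicate_succ, List.foldl_cons]
    have hc : PySem.Set.contains seen x = true := (PySem.Set.contains_iff seen x).mpr hx
    have hstep : pvStep (dup, seen, out) x = (dup ++ [x], seen, out) := by
      simp [pvStep, hx]
    rw [hstep, ih]
    simp

-- update by a list whose elements are already present does nothing
theorem pv_update_rep_mem (x : Int) : ∀ (k : Nat) (s : PySem.Set Int), x ∈ s →
    PySem.Set.update s (List.replicate k x) = s := by
  intro k
  induction k with
  | zero => intro s _; exact PySem.Set.update_nil s
  | succ k ih =>
    intro s hx
    rw [List.replicate_succ, PySem.Set.update_cons, PySem.Set.add_of_mem hx]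
    exact ih s hx

-- adding the same element repeatedly is one add
theorem pv_update_rep (s : PySem.Set Int) (x : Int) : ∀ (m : Nat), 1 ≤ m →
    PySem.Set.update s (List.replicate m x) = PySem.Set.add s x := by
  intro m hm
  obtain ⟨k, rfl⟩ : ∃ k, m = k + 1 := ⟨m - 1, by omega⟩
  rw [List.replicate_succ, PySem.Set.update_cons]
  exact pv_update_rep_mem x k (PySem.Set.add s x) ((PySem.Set.mem_add s x x).mpr (Or.inr rfl))

-- update only touches the part of the set meeting the list
theorem pv_update_prefix : ∀ (l : List Int) (s1 s2 : List Int), (∀ y ∈ s1, y ∉ l) →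
    PySem.Set.update (s1 ++ s2) l = s1 ++ PySem.Set.update s2 l := by
  intro l
  induction l with
  | nil => intro s1 s2 _; rw [PySem.Set.update_nil, PySem.Set.update_nil]
  | cons z l ih =>
    intro s1 s2 hd
    rw [PySem.Set.update_cons, PySem.Set.update_cons]
    have hz1 : z ∉ s1 := fun hz => hd z hz (by simp)
    by_cases hz2 : z ∈ s2
    · rw [PySem.Set.add_of_mem (by simp [hz2]), PySem.Set.add_of_mem hz2]
      exact ih s1 s2 (fun y hy => fun hyl => hd y hy (by simp [hyl]))
    · rw [PySem.Set.add_of_not_mem (by simp [hz1, hz2]), PySem.Set.add_of_not_mem hz2]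
      rw [List.append_assoc] at *
      exact ih s1 (s2 ++ [z]) (fun y hy => fun hyl => hd y hy (by simp [hyl]))

-- ofList of a nonempty constant block is the singleton
theorem pv_ofList_rep (x : Int) : ∀ (m : Nat), PySem.Set.ofList (List.replicate (m + 1) x) = [x] := by
  intro m
  induction m with
  | zero => rfl
  | succ m ih =>
    rw [List.replicate_succ, PySem.Set.ofList_cons, ih]
    simp [PySem.Set.discard]

-- MAIN BRIDGE: on a sorted list, A's seen-set scan produces exactly B's keys and surplus counts
theorem pv_sc : ∀ (N : Nat) (p : List Int), p.length ≤ N → p.Pairwise (· ≤ ·) →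
    ∀ (s : PySem.Set Int) (dup out : List Int), (∀ y ∈ s, ∀ z ∈ p, y ≠ z) →
    p.foldl pvStep (dup, s, out)
      = (dup ++ pvFM p, PySem.Set.update s p, out ++ PySem.Set.ofList p) := by
  intro N
  induction N with
  | zero =>
    intro p hlen _ s dup out _
    have hp : p = [] := List.eq_nil_of_length_eq_zero (Nat.le_zero.mp hlen)
    subst hp
    simp [pvFM, PySem.Set.update_nil, PySem.Set.ofList_nil]
  | succ N ih =>
    intro p hlen hsorted s dup out hdisj
    rcases hp : p with _ | ⟨x, r⟩
    · simp [pvFM, PySem.Set.update_nil, PySem.Set.ofList_nil]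
    · subst hp
      obtain ⟨m, q, hm1, hsplit, hqhead⟩ :
          ∃ (m : Nat) (q : List Int), 1 ≤ m ∧ List.replicate m x ++ q = x :: r ∧
            (∀ (q0 : Int) (qt : List Int), q = q0 :: qt → q0 ≠ x) := by
        refine ⟨(List.takeWhile (fun z : Int => z == x) (x :: r)).length,
                List.dropWhile (fun z : Int => z == x) (x :: r), ?_, ?_, ?_⟩
        · rw [List.takeWhile_cons_of_pos (by simp)]; simp
        · have htw : List.takeWhile (fun z : Int => z == x) (x :: r)
              = List.replicate (List.takeWhile (fun z : Int => z == x) (x :: r)).length x := by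
            rw [List.eq_replicate_iff]
            exact ⟨rfl, fun b hb => by simpa using List.mem_takeWhile_imp hb⟩
          conv_lhs => rw [← htw]
          exact List.takeWhile_append_dropWhile
        · intro q0 qt hq
          have := pv_head_dropWhile (fun z : Int => z == x) (x :: r) q0 qt hq
          simpa using this
      have hpwall : (List.replicate m x ++ q).Pairwise (· ≤ ·) := by rw [hsplit]; exact hsorted
      rw [List.pairwise_append] at hpwall
      obtain ⟨-, hqsort, hcross⟩ := hpwall
      have hxle : ∀ z ∈ q, x ≤ z := fun z hz =>
        hcross x (by rw [List.mem_replicate]; exact ⟨by omega, rfl⟩) z hz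
      have hxq : ∀ z ∈ q, x < z := by
        rcases q with _ | ⟨q0, qt⟩
        · intro z hz; simp at hz
        · have hq0x : q0 ≠ x := hqhead q0 qt rfl
          have hxq0 : x < q0 := lt_of_le_of_ne (hxle q0 (by simp)) (Ne.symm hq0x)
          intro z hz
          rcases List.mem_cons.mp hz with rfl | hz2
          · exact hxq0
          · have hq0z : q0 ≤ z := (List.pairwise_cons.mp hqsort).1 z hz2
            omega
      have hxnq : x ∉ q := fun hx => lt_irrefl x (hxq x hx)
      have hfold : (x :: r).foldl pvStep (dup, s, out)
          = q.foldl pvStep ((List.replicate m x).foldl pvStep (dup, s, out)) := by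
        rw [← hsplit, List.foldl_append]
      have hxs : x ∉ s := fun hx => hdisj x hx x (by simp) rfl
      have hrep : (List.replicate m x).foldl pvStep (dup, s, out)
          = (dup ++ List.replicate (m - 1) x, PySem.Set.add s x, out ++ [x]) := by
        obtain ⟨mm, hmm⟩ : ∃ mm, m = mm + 1 := ⟨m - 1, by omega⟩
        rw [hmm, List.replicate_succ, List.foldl_cons]
        have hcf : PySem.Set.contains s x = false := by
          rcases h : PySem.Set.contains s x with _ | _
          · rfl
          · exact absurd ((PySem.Set.contains_iff s x).mp h) hxs
        have hstep : pvStep (dup, s, out) x = (dup, PySem.Set.add s x, out ++ [x]) := by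
          simp [pvStep, hxs]
        rw [hstep, pv_scan_rep_mem x (PySem.Set.add s x)
          ((PySem.Set.mem_add s x x).mpr (Or.inr rfl)) mm dup (out ++ [x])]
        simp
      have hqlen : q.length ≤ N := by
        have hlq := congrArg List.length hsplit
        simp only [List.length_append, List.length_replicate, List.length_cons] at hlq
        simp only [List.length_cons] at hlen
        omega
      have hdisj2 : ∀ y ∈ PySem.Set.add s x, ∀ z ∈ q, y ≠ z := by
        intro y hy z hz
        rcases (PySem.Set.mem_add s x y).mp hy with hy' | rfl
        · exact hdisj y hy' z (by rw [← hsplit]; exact List.mem_append_right _ hz)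
        · exact ne_of_lt (hxq z hz)
      have hrec := ih q hqlen hqsort (PySem.Set.add s x)
        (dup ++ List.replicate (m - 1) x) (out ++ [x]) hdisj2
      rw [hfold, hrep, hrec]
      have hofq : PySem.Set.ofList (x :: r) = x :: PySem.Set.ofList q := by
        rw [← hsplit, PySem.Set.ofList_append]
        obtain ⟨mm, hmm⟩ : ∃ mm, m = mm + 1 := ⟨m - 1, by omega⟩
        rw [hmm, pv_ofList_rep]
        have := pv_update_prefix q [x] [] (by intro y hy; simp at hy; subst hy; exact hxnq)
        simpa using this
      have hcx : (x :: r).count x = m := by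
        rw [← hsplit, List.count_append, List.count_replicate_self, List.count_eq_zero.mpr hxnq]
        omega
      have hFM : pvFM (x :: r) = List.replicate (m - 1) x ++ pvFM q := by
        unfold pvFM
        rw [hofq, List.flatMap_cons, hcx]
        congr 1
        · congr 1
          omega
        · have hc2 : ∀ k ∈ PySem.Set.ofList q,
              List.replicate ((((x :: r).count k : Int)) - 1).toNat k
                = List.replicate (((q.count k : Int)) - 1).toNat k := by
            intro k hk
            have hkq : k ∈ q := (PySem.Set.mem_ofList q k).mp hk
            have hkx : k ≠ x := fun h => by subst h; exact hxnq hkq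
            have : (x :: r).count k = q.count k := by
              rw [← hsplit, List.count_append, List.count_eq_zero.mpr
                (fun h => hkx ((List.eq_of_mem_replicate h)))]
              omega
            rw [this]
          calc (PySem.Set.ofList q).flatMap (fun k => List.replicate ((((x :: r).count k : Int)) - 1).toNat k)
              = ((PySem.Set.ofList q).map (fun k => List.replicate ((((x :: r).count k : Int)) - 1).toNat k)).flatten := by
                rw [List.flatMap_def]
            _ = ((PySem.Set.ofList q).map (fun k => List.replicate (((q.count k : Int)) - 1).toNat k)).flatten := by
                rw [List.map_congr_left hc2]
            _ = (PySem.Set.ofList q).flatMap (fun k => List.replicate (((q.count k : Int)) - 1).toNat k) := by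
                rw [List.flatMap_def]
      have h2 : PySem.Set.update (PySem.Set.add s x) q = PySem.Set.update s (x :: r) := by
        rw [← hsplit, PySem.Set.update_append, pv_update_rep s x m hm1]
      simp only [Prod.mk.injEq]
      refine ⟨?_, ?_, ?_⟩
      · rw [hFM]; simp
      · exact h2
      · rw [hofq]; simp

-- the scan distributes every element to exactly one of its two output lists
theorem pv_scan_len : ∀ (p : List Int) (dup : List Int) (s : PySem.Set Int) (out : List Int),
    (p.foldl pvStep (dup, s, out)).1.length + (p.foldl pvStep (dup, s, out)).2.2.length
      = dup.length + out.length + p.length := by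
  intro p
  induction p with
  | nil => intro dup s out; simp
  | cons x r ih =>
    intro dup s out
    rw [List.foldl_cons]
    by_cases hc : PySem.Set.contains s x = true
    · have hmem : x ∈ s := (PySem.Set.contains_iff s x).mp hc
      have hstep : pvStep (dup, s, out) x = (dup ++ [x], s, out) := by simp [pvStep, hmem]
      rw [hstep, ih]
      simp; omega
    · have hstep : pvStep (dup, s, out) x = (dup, PySem.Set.add s x, out ++ [x]) := by
        simp only [pvStep]
        rw [if_neg hc]
      rw [hstep, ih]
      simp; omega

-- pvFM of a singleton is empty (count 1, zero surplus copies)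
theorem pv_FM_single (a0 : Int) : pvFM [a0] = [] := by
  unfold pvFM
  simp

-- B's value once the head of the sorted list is known: keys of the counter of
-- arr[0] followed by arr[1:n], then the surplus copies
theorem pv_B_eval (n : Int) (arr : List Int) (h1 : n ≠ 1) (a0 : Int) (t : List Int)
    (hst : PySem.List.sorted arr (fun x => x) false = a0 :: t) :
    solve_alt n arr =
      PySem.Set.ofList (a0 :: PySem.List.slice (a0 :: t) (some 1) (some n))
      ++ pvFM (a0 :: PySem.List.slice (a0 :: t) (some 1) (some n)) := by
  simp only [solve_alt]
  rw [if_neg h1, hst]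
  simp only [PySem.List.pyGet?_zero_cons]
  have hcnt : (PySem.List.slice (a0 :: t) (some 1) (some n)).foldl
      (fun (d : PySem.Dict Int Int) (x : Int) => d.insert x (d.getD x 0 + 1))
      (PySem.Dict.empty.insert a0 1)
      = PySem.Dict.counter (a0 :: PySem.List.slice (a0 :: t) (some 1) (some n)) := by
    rw [← PySem.Dict.foldl_insert_getD_add_one_eq_counter, List.foldl_cons]
    simp
  rw [hcnt, PySem.Dict.keys_counter, PySem.List.foldl_append_eq_flatMap,
    PySem.Dict.items_counter, List.flatMap_map]
  rfl

-- clamped-index arithmetic for the slice bound 1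
theorem pv_clamp_one (L : Nat) (hL : 1 ≤ L) : PySem.List.clampIdx L (1 : Int) = 1 := by
  rw [show (1:Int) = ((1:Nat):Int) from rfl, PySem.List.clampIdx_natCast]
  omega

-- arr[1:n] is empty for a non-positive n that reaches at most index 1
theorem pv_slice_nil (a0 : Int) (t : List Int) (n : Int) (hn : n ≤ 0)
    (hsmall : n = 0 ∨ ((a0 :: t).length : Int) + n ≤ 1) :
    PySem.List.slice (a0 :: t) (some 1) (some n) = [] := by
  apply List.eq_nil_of_length_eq_zero
  rw [PySem.List.length_slice, pv_clamp_one _ (by simp)]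
  rcases eq_or_lt_of_le hn with h0 | hneg
  · subst h0
    rw [show (0:Int) = ((0:Nat):Int) from rfl, PySem.List.clampIdx_natCast]
    simp
  · have hk : 0 < (-n).toNat := by omega
    have hn2 : n = -(((-n).toNat : Nat) : Int) := by omega
    rw [hn2, PySem.List.clampIdx_neg_natCast _ _ hk]
    rcases hsmall with h | h
    · omega
    · simp only [List.length_cons] at h ⊢
      omega

-- A on n ≤ 0 (loop body never runs): the pre-seeded [min(arr)]
theorem pv_A_small (n : Int) (arr : List Int) (h1 : n ≠ 1) (hn0 : n ≤ 0)
    (a0 : Int) (t : List Int)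
    (hst : PySem.List.sorted arr (fun x => x) false = a0 :: t) :
    solve n arr = [a0] := by
  simp only [solve]
  rw [if_neg h1, hst, PySem.List.pyGet?_zero_cons, PySem.List.pyRange_one_eq_nil (by omega)]
  simp

-- a[0] :: a[1:n] is a[:n] for 1 ≤ n
theorem pv_cons_slice (a0 : Int) (t : List Int) (n : Int) (hn : 1 ≤ n) :
    a0 :: PySem.List.slice (a0 :: t) (some 1) (some n) = (a0 :: t).take n.toNat := by
  rw [PySem.List.slice_toNat _ (by norm_num) (by omega)]
  rw [show ((1:Int)).toNat = 1 from rfl]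
  simp only [List.drop_succ_cons, List.drop_zero]
  conv_rhs => rw [show n.toNat = (n.toNat - 1) + 1 from by omega, List.take_succ_cons]

-- the slice form of PySem: clamped drop/take (the definition, for reuse below)
theorem pv_slice_some_some (xs : List Int) (a b : Int) :
    PySem.List.slice xs (some a) (some b)
      = (xs.drop (PySem.List.clampIdx xs.length a)).take
          (PySem.List.clampIdx xs.length b - PySem.List.clampIdx xs.length a) := by
  simp [PySem.List.slice]

-- A's value when the index loop runs: the pvStep-scan of the first n sorted elements
theorem pv_A_eval (n : Int) (arr : List Int) (h1 : n ≠ 1) (hn : 2 ≤ n) (hlen : n ≤ (arr.length : Int))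
    (a0 : Int) (t : List Int)
    (hst : PySem.List.sorted arr (fun x => x) false = a0 :: t) :
    solve n arr =
      (((a0 :: t).take n.toNat).foldl pvStep ([], PySem.Set.empty, [])).2.2
      ++ (((a0 :: t).take n.toNat).foldl pvStep ([], PySem.Set.empty, [])).1 := by
  have hL : (a0 :: t).length = arr.length := by
    rw [← hst]; exact PySem.List.length_sorted arr _ _
  simp only [solve]
  rw [if_neg h1, hst]
  simp only [PySem.List.pyGet?_zero_cons]
  have hm : n = 1 + ((n - 1).toNat : Int) := by omega
  have hF := pv_loopA (a0 :: t) (n - 1).toNat 1 ([], PySem.Set.ofList [a0], [a0]) (by norm_num)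
    (by simp only [List.length_cons] at hL ⊢; omega)
  rw [show PySem.List.pyRange 1 n 1 = PySem.List.pyRange 1 (1 + ((n - 1).toNat : Int)) 1 from by
    rw [← hm]]
  simp only [hF]
  have htake : (a0 :: t).take n.toNat = a0 :: t.take (n - 1).toNat := by
    rw [show n.toNat = (n - 1).toNat + 1 from by omega, List.take_succ_cons]
  rw [htake, List.foldl_cons]
  have hstep : pvStep ([], PySem.Set.empty, []) a0 = ([], PySem.Set.ofList [a0], [a0]) := by
    simp [pvStep, PySem.Set.empty, PySem.Set.add_of_not_mem, PySem.Set.ofList_cons,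
      PySem.Set.ofList_nil, PySem.Set.discard]
  rw [hstep]
  simp

-- ports agree on every admitted input outside the change region
theorem pv_main : ∀ (n : Int) (arr : List Int), Pre_solve n arr → ¬ D_solve n arr → solve n arr = solve_alt n arr := by
  intro n arr hpre hD
  by_cases h1 : n = 1
  · simp [solve, solve_alt, h1]
  · have hpre2 : arr ≠ [] ∧ n ≤ (arr.length : Int) := hpre.resolve_left h1
    obtain ⟨a0, t, hst⟩ : ∃ a0 t, PySem.List.sorted arr (fun x => x) false = a0 :: t := by
      rcases hs : PySem.List.sorted arr (fun x => x) false with _ | ⟨a0, t⟩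
      · exact absurd (by rwa [PySem.List.sorted_eq_nil_iff] at hs) hpre2.1
      · exact ⟨a0, t, rfl⟩
    have hL : (a0 :: t).length = arr.length := by
      rw [← hst]; exact PySem.List.length_sorted arr _ _
    have hpw : (a0 :: t).Pairwise (· ≤ ·) := by
      have := PySem.List.sorted_pairwise arr (fun x => x) (κ := Int)
      rw [hst] at this
      simpa using this
    rw [pv_B_eval n arr h1 a0 t hst]
    by_cases hn2 : 2 ≤ n
    · rw [pv_A_eval n arr h1 hn2 hpre2.2 a0 t hst, pv_cons_slice a0 t n (by omega)]
      have hsorted2 : ((a0 :: t).take n.toNat).Pairwise (· ≤ ·) :=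
        List.Pairwise.sublist (List.take_sublist _ _) hpw
      rw [pv_sc ((a0 :: t).take n.toNat).length _ le_rfl hsorted2 PySem.Set.empty [] []
        (by intro y hy; simp [PySem.Set.empty] at hy)]
      simp
    · have hn0 : n ≤ 0 := by omega
      unfold D_solve at hD
      have hsmall : n = 0 ∨ ((a0 :: t).length : Int) + n ≤ 1 := by
        rw [hL]
        omega
      rw [pv_slice_nil a0 t n hn0 hsmall, pv_A_small n arr h1 hn0 a0 t hst, pv_FM_single]
      simp [PySem.Set.ofList_cons, PySem.Set.ofList_nil, PySem.Set.discard]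

-- ===== VERDICT (by name: the statement is the Claim_ definition above) =====
theorem solve_spec : Claim_unchanged_solve := by
  intro n arr _ hpre
  unfold Spec_solve
  intro hD
  exact pv_main n arr hpre hD

theorem solve_changed : Claim_changed_solve := by unfold Claim_changed_solve; decide

theorem solve_tight : Claim_exact_solve := by
  intro n arr _ hpre hD
  obtain ⟨hneg, hge2⟩ := hD
  have h1 : n ≠ 1 := by omega
  have hpre2 : arr ≠ [] ∧ n ≤ (arr.length : Int) := hpre.resolve_left h1
  obtain ⟨a0, t, hst⟩ : ∃ a0 t, PySem.List.sorted arr (fun x => x) false = a0 :: t := by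
    rcases hs : PySem.List.sorted arr (fun x => x) false with _ | ⟨a0, t⟩
    · exact absurd (by rwa [PySem.List.sorted_eq_nil_iff] at hs) hpre2.1
    · exact ⟨a0, t, rfl⟩
  have hL : (a0 :: t).length = arr.length := by
    rw [← hst]; exact PySem.List.length_sorted arr _ _
  have hpw : (a0 :: t).Pairwise (· ≤ ·) := by
    have := PySem.List.sorted_pairwise arr (fun x => x) (κ := Int)
    rw [hst] at this
    simpa using this
  have hA : solve n arr = [a0] := pv_A_small n arr h1 (by omega) a0 t hst
  -- the length of arr[1:n] inside D_: len(arr) + n - 1 ≥ 1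
  have hslen : (PySem.List.slice (a0 :: t) (some 1) (some n)).length
      = (a0 :: t).length - (-n).toNat - 1 := by
    have hk : 0 < (-n).toNat := by omega
    have hn2 : n = -(((-n).toNat : Nat) : Int) := by omega
    rw [PySem.List.length_slice, pv_clamp_one _ (by simp)]
    conv_lhs => rw [hn2]
    rw [PySem.List.clampIdx_neg_natCast _ _ hk]
  -- a[0] :: a[1:n] stays sorted: it is a sublist of the sorted a[0] :: t
  have hss := pv_slice_some_some (a0 :: t) 1 n
  rw [pv_clamp_one _ (by simp)] at hss
  have hsub : (PySem.List.slice (a0 :: t) (some 1) (some n)).Sublist t := by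
    rw [hss]
    exact List.take_sublist _ _
  have hpwt := List.pairwise_cons.mp hpw
  have hp : (a0 :: PySem.List.slice (a0 :: t) (some 1) (some n)).Pairwise (· ≤ ·) :=
    List.pairwise_cons.mpr ⟨fun z hz => hpwt.1 z (hsub.subset hz), List.Pairwise.sublist hsub hpwt.2⟩
  -- B's output has as many elements as a[0] :: a[1:n]
  have hBlen : (solve_alt n arr).length
      = (a0 :: PySem.List.slice (a0 :: t) (some 1) (some n)).length := by
    rw [pv_B_eval n arr h1 a0 t hst]
    have hsc := pv_sc (a0 :: PySem.List.slice (a0 :: t) (some 1) (some n)).length _ le_rfl hp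
      PySem.Set.empty [] [] (by intro y hy; simp [PySem.Set.empty] at hy)
    have hlenf := pv_scan_len (a0 :: PySem.List.slice (a0 :: t) (some 1) (some n)) [] PySem.Set.empty []
    rw [hsc] at hlenf
    simp only [List.nil_append, List.length_nil] at hlenf
    simp only [List.length_append]
    omega
  intro heq
  have hlen2 := congrArg List.length heq
  rw [hA, hBlen] at hlen2
  have h1l : ([a0] : List Int).length = 1 := rfl
  have h2l : (a0 :: PySem.List.slice (a0 :: t) (some 1) (some n)).length
      = (PySem.List.slice (a0 :: t) (some 1) (some n)).length + 1 := by
    simp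
  rw [h1l, h2l, hslen] at hlen2
  have h3l : (a0 :: t).length = t.length + 1 := by simp
  rw [h3l] at hlen2
  have hLl : t.length + 1 = arr.length := by simpa using hL
  omega
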